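-- pv_equiv track=rewrite | github.com/krisx303/algorithms-data-structures | ex2.py | hasZeroSumSublist
-- ===== SOURCE A (Python) =====
-- def hasZeroSumSublist(nums):
--     values = [0]
--     val_len = 0
--     total = 0
--     for i in nums:
--         total += i
--         j = val_len
--         while j > -1 and values[j] >= total:
--             if values[j] == total:
--                 return True
--             j -= 1
--         else:
--             values.append(total)
--             val_len += 1
--     return False
-- ===== SOURCE B (Python) =====
-- def hasZeroSumSublist(nums):
--     seen = {0}
--     total = 0
--     for x in nums:
--         total += x
--         if total in seen:
--             return True
--         seen.add(total)
--     return False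
-- ===== Notes on version B (the rewrite author's own statement) =====
-- stated objective: alternative
-- what changed: B replaces A's backward scan of the stored prefix-sum list (which stops at the first smaller value and so misses repeated prefix sums hidden behind a dip) with a single pass keeping a hash set of all prefix sums seen, answering true exactly when a prefix sum repeats.
-- intended difference: On lists that contain a zero-sum contiguous sublist but none all of whose proper nonempty prefixes have positive sum (e.g. [2,-1,1]), A's backward scan stops at a smaller intervening prefix sum and returns False, while B returns True, the intended answer for detecting a zero-sum sublist. — e.g. on hasZeroSumSublist([2, -1, 1]): A returns false, B returns true
import Mathlib
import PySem

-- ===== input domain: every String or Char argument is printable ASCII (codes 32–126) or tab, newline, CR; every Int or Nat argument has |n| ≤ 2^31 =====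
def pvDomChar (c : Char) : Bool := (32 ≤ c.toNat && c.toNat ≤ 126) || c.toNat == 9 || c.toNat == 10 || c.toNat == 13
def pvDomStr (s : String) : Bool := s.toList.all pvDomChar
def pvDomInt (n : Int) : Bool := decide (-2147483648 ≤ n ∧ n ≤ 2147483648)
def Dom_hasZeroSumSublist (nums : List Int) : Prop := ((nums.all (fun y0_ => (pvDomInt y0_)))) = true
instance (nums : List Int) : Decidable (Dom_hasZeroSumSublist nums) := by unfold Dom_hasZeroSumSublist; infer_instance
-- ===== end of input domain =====

-- B replaces A's backward scan of the stored prefix-sum list with a single pass keeping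
-- a set of all prefix sums seen (true iff a prefix sum repeats); A's scan stops at the
-- first smaller stored value and so misses some zero-sum sublists (see D_).

-- ===== PORT A =====
-- inner 'while j > -1 and values[j] >= total' loop; j is always a valid index
-- (0 ≤ j ≤ val_len < len(values)), so values[j] is ported as getD with default 0
def pvScanA (values : List Int) (total : Int) (j : Nat) : Bool :=
  if values.getD j 0 ≥ total then
    if values.getD j 0 = total then true
    else
      match j with
      | 0 => false            -- j becomes -1: loop condition fails
      | j' + 1 => pvScanA values total j'
  else false

def pvLoopA : List Int → List Int → Nat → Int → Bool
  | [], _, _, _ => false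
  | i :: rest, values, val_len, total =>
    let total' := total + i
    if pvScanA values total' val_len then true
    else pvLoopA rest (values ++ [total']) (val_len + 1) total'

def hasZeroSumSublist (nums : List Int) : Bool := pvLoopA nums [0] 0 0

-- ===== PORT B =====
def pvLoopB : List Int → PySem.Set Int → Int → Bool
  | [], _, _ => false
  | x :: rest, seen, total =>
    let total' := total + x
    if PySem.Set.contains seen total' then true
    else pvLoopB rest (PySem.Set.add seen total') total'

def hasZeroSumSublist_alt (nums : List Int) : Bool :=
  pvLoopB nums (PySem.Set.ofList [0]) 0

-- ===== PRECONDITION & SPEC =====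
-- prefix sum of the first k elements
def pvPref (nums : List Int) (k : Nat) : Int := (nums.take k).sum

-- some prefix sum repeats (⟺ a nonempty contiguous sublist sums to zero)
def pvEqPair (nums : List Int) : Prop :=
  ∃ j < nums.length + 1, ∃ i < j, pvPref nums i = pvPref nums j

-- a repeated prefix sum with all strictly larger prefix sums in between
-- (exactly the pairs A's backward scan can reach)
def pvVisPair (nums : List Int) : Prop :=
  ∃ j < nums.length + 1, ∃ i < j,
    pvPref nums i = pvPref nums j ∧ ∀ k < j, i < k → pvPref nums k > pvPref nums j

-- On lists that contain a zero-sum contiguous sublist but none all of whose proper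
-- nonempty prefixes have positive sum (e.g. [2,-1,1]), A's backward scan stops at a
-- smaller intervening prefix sum and returns False, while B returns True, the intended
-- answer for detecting a zero-sum sublist.
def D_hasZeroSumSublist (nums : List Int) : Prop :=
  pvEqPair nums ∧ ¬ pvVisPair nums

instance (nums : List Int) : Decidable (D_hasZeroSumSublist nums) := by
  unfold D_hasZeroSumSublist pvEqPair pvVisPair; infer_instance

def Spec_hasZeroSumSublist (nums : List Int) (out : Bool) : Prop :=
  ¬ D_hasZeroSumSublist nums → out = hasZeroSumSublist_alt nums
instance (nums : List Int) (out : Bool) : Decidable (Spec_hasZeroSumSublist nums out) := by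
  unfold Spec_hasZeroSumSublist; infer_instance

def pvDiffWitness_hasZeroSumSublist : List Int := [2, -1, 1]
def pvDiffWitnessOut_hasZeroSumSublist : Bool × Bool := (false, true)

-- ===== CLAIM (what is proved, stated in full; the proofs are below) =====
def Claim_unchanged_hasZeroSumSublist : Prop :=
  ∀ (nums : List Int), Dom_hasZeroSumSublist nums →
    Spec_hasZeroSumSublist nums (hasZeroSumSublist nums)

def Claim_changed_hasZeroSumSublist : Prop :=
  Dom_hasZeroSumSublist (pvDiffWitness_hasZeroSumSublist) ∧
  D_hasZeroSumSublist (pvDiffWitness_hasZeroSumSublist) ∧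
  hasZeroSumSublist (pvDiffWitness_hasZeroSumSublist) = pvDiffWitnessOut_hasZeroSumSublist.1 ∧
  hasZeroSumSublist_alt (pvDiffWitness_hasZeroSumSublist) = pvDiffWitnessOut_hasZeroSumSublist.2 ∧
  pvDiffWitnessOut_hasZeroSumSublist.1 ≠ pvDiffWitnessOut_hasZeroSumSublist.2

def Claim_exact_hasZeroSumSublist : Prop :=
  ∀ (nums : List Int), Dom_hasZeroSumSublist nums → D_hasZeroSumSublist nums →
    hasZeroSumSublist nums ≠ hasZeroSumSublist_alt nums

-- ===== LEMMAS AND PROOFS =====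

lemma pv_getD_map_range (f : Nat → Int) (n i : Nat) (h : i < n) :
    ((List.range n).map f).getD i 0 = f i := by
  rw [List.getD_eq_getElem?_getD, List.getElem?_map, List.getElem?_range h]
  rfl

-- characterisation of A's inner while loop
lemma pvScanA_iff (values : List Int) (total : Int) (j : Nat) :
    pvScanA values total j = true ↔
      ∃ i ≤ j, values.getD i 0 = total ∧ ∀ k, i < k → k ≤ j → values.getD k 0 > total := by
  induction j with
  | zero =>
    rw [pvScanA]
    split_ifs with h1 h2
    · simp only [true_iff]
      exact ⟨0, le_refl _, h2, by omega⟩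
    · simp only [false_iff]
      rintro ⟨i, hi, hieq, -⟩
      interval_cases i
      exact h2 hieq
    · simp only [false_iff]
      rintro ⟨i, hi, hieq, -⟩
      interval_cases i
      exact h1 (le_of_eq hieq.symm)
  | succ j' ih =>
    rw [pvScanA]
    split_ifs with h1 h2
    · simp only [true_iff]
      exact ⟨j' + 1, le_refl _, h2, by omega⟩
    · rw [ih]
      constructor
      · rintro ⟨i, hi, hieq, hall⟩
        refine ⟨i, by omega, hieq, fun k hik hk => ?_⟩
        rcases Nat.lt_or_ge k (j' + 1) with hk' | hk'
        · exact hall k hik (by omega)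
        · have : k = j' + 1 := by omega
          subst this
          exact lt_of_le_of_ne h1 (fun h => h2 h.symm)
      · rintro ⟨i, hi, hieq, hall⟩
        have hij : i ≤ j' := by
          rcases Nat.lt_or_ge i (j' + 1) with h | h
          · omega
          · exfalso; have : i = j' + 1 := by omega
            subst this; exact h2 hieq
        exact ⟨i, hij, hieq, fun k hik hk => hall k hik (by omega)⟩
    · simp only [false_iff]
      rintro ⟨i, hi, hieq, hall⟩
      rcases Nat.lt_or_ge i (j' + 1) with h | h
      · have hgt := hall (j' + 1) (by omega) (le_refl _)
        exact absurd (le_of_lt hgt) h1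
      · have : i = j' + 1 := by omega
        subst this
        exact h1 (le_of_eq hieq.symm)

lemma pvPref_succ (nums : List Int) (m : Nat) (x : Int) (l' : List Int)
    (h : nums.drop m = x :: l') :
    pvPref nums (m + 1) = pvPref nums m + x := by
  have hm : m < nums.length := by
    by_contra hc
    rw [List.drop_eq_nil_of_le (by omega)] at h
    simp at h
  have hx : nums[m]? = some x := by
    have h0 : (nums.drop m)[0]? = some x := by rw [h]; rfl
    rwa [List.getElem?_drop] at h0
  unfold pvPref
  rw [List.take_add_one, hx]
  simp

lemma pvLoopA_char (nums : List Int) :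
    ∀ (l : List Int) (m : Nat), nums.drop m = l → m ≤ nums.length →
      (pvLoopA l ((List.range (m + 1)).map (pvPref nums)) m (pvPref nums m) = true ↔
        ∃ j, m < j ∧ j < nums.length + 1 ∧ ∃ i < j,
          pvPref nums i = pvPref nums j ∧
          ∀ k < j, i < k → pvPref nums k > pvPref nums j) := by
  intro l
  induction l with
  | nil =>
    intro m hdrop hm
    have hml : m = nums.length := by
      by_contra hc
      have hm' : m < nums.length := by omega
      have := List.drop_eq_nil_iff.mp hdrop
      omega
    subst hml
    simp only [pvLoopA, Bool.false_eq_true, false_iff]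
    rintro ⟨j, hj1, hj2, -⟩; omega
  | cons x l' ih =>
    intro m hdrop hm
    have hm' : m < nums.length := by
      by_contra hc
      rw [List.drop_eq_nil_of_le (by omega)] at hdrop
      simp at hdrop
    have hdrop' : nums.drop (m + 1) = l' := by
      have := List.drop_drop (l := nums) (i := 1) (j := m)
      rw [← this]
      simp [hdrop]
    have htot : pvPref nums m + x = pvPref nums (m + 1) :=
      (pvPref_succ nums m x l' hdrop).symm
    have happ : (List.range (m + 1)).map (pvPref nums) ++ [pvPref nums (m + 1)] =
        (List.range (m + 1 + 1)).map (pvPref nums) := by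
      rw [List.range_succ (n := m + 1), List.map_append]; rfl
    rw [pvLoopA]
    simp only [htot, happ]
    -- scan at step m+1 detects exactly the "visible" pair ending at m+1
    have hscan : pvScanA ((List.range (m + 1)).map (pvPref nums)) (pvPref nums (m + 1)) m = true ↔
        ∃ i < m + 1, pvPref nums i = pvPref nums (m + 1) ∧
          ∀ k < m + 1, i < k → pvPref nums k > pvPref nums (m + 1) := by
      rw [pvScanA_iff]
      constructor
      · rintro ⟨i, hi, hieq, hall⟩
        refine ⟨i, by omega, ?_, fun k hk hik => ?_⟩
        · rw [pv_getD_map_range _ _ _ (by omega)] at hieq; exact hieq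
        · have := hall k hik (by omega)
          rwa [pv_getD_map_range _ _ _ (by omega)] at this
      · rintro ⟨i, hi, hieq, hall⟩
        refine ⟨i, by omega, ?_, fun k hik hk => ?_⟩
        · rw [pv_getD_map_range _ _ _ (by omega)]; exact hieq
        · rw [pv_getD_map_range _ _ _ (by omega)]
          exact hall k (by omega) hik
    split_ifs with hcond
    · simp only [true_iff]
      obtain ⟨i, hi, hieq, hall⟩ := hscan.mp hcond
      exact ⟨m + 1, by omega, by omega, i, hi, hieq, hall⟩
    · rw [ih (m + 1) hdrop' (by omega)]
      constructor
      · rintro ⟨j, hj1, hj2, w⟩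
        exact ⟨j, by omega, hj2, w⟩
      · rintro ⟨j, hj1, hj2, i, hi, hieq, hall⟩
        rcases Nat.lt_or_ge (m + 1) j with h | h
        · exact ⟨j, h, hj2, i, hi, hieq, hall⟩
        · exfalso
          have : j = m + 1 := by omega
          subst this
          exact hcond (hscan.mpr ⟨i, hi, hieq, hall⟩)

lemma hasZeroSumSublist_iff (nums : List Int) :
    hasZeroSumSublist nums = true ↔ pvVisPair nums := by
  have h0 : ((List.range 1).map (pvPref nums)) = [0] := by
    simp [List.range_succ, pvPref]
  have hchar := pvLoopA_char nums nums 0 (by simp) (by omega)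
  rw [h0] at hchar
  have hP0 : pvPref nums 0 = 0 := by simp [pvPref]
  unfold hasZeroSumSublist
  refine Iff.trans (by exact hchar) ?_
  unfold pvVisPair
  constructor
  · rintro ⟨j, -, hj2, w⟩; exact ⟨j, hj2, w⟩
  · rintro ⟨j, hj2, i, hi, w⟩; exact ⟨j, by omega, hj2, i, hi, w⟩

lemma pvLoopB_char (nums : List Int) :
    ∀ (l : List Int) (m : Nat) (seen : PySem.Set Int), nums.drop m = l → m ≤ nums.length →
      (∀ x : Int, x ∈ seen ↔ ∃ i ≤ m, pvPref nums i = x) →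
      (pvLoopB l seen (pvPref nums m) = true ↔
        ∃ j, m < j ∧ j < nums.length + 1 ∧ ∃ i < j, pvPref nums i = pvPref nums j) := by
  intro l
  induction l with
  | nil =>
    intro m seen hdrop hm hseen
    have hml : m = nums.length := by
      by_contra hc
      have := List.drop_eq_nil_iff.mp hdrop
      omega
    subst hml
    simp only [pvLoopB, Bool.false_eq_true, false_iff]
    rintro ⟨j, hj1, hj2, -⟩; omega
  | cons x l' ih =>
    intro m seen hdrop hm hseen
    have hm' : m < nums.length := by
      by_contra hc
      rw [List.drop_eq_nil_of_le (by omega)] at hdrop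
      simp at hdrop
    have hdrop' : nums.drop (m + 1) = l' := by
      have := List.drop_drop (l := nums) (i := 1) (j := m)
      rw [← this]
      simp [hdrop]
    have htot : pvPref nums m + x = pvPref nums (m + 1) :=
      (pvPref_succ nums m x l' hdrop).symm
    rw [pvLoopB]
    simp only [htot]
    by_cases hmem : pvPref nums (m + 1) ∈ seen
    · rw [if_pos (by simpa [PySem.Set.contains] using hmem)]
      simp only [true_iff]
      obtain ⟨i, hi, hieq⟩ := (hseen _).mp hmem
      exact ⟨m + 1, by omega, by omega, i, by omega, hieq⟩
    · rw [if_neg (by simpa [PySem.Set.contains] using hmem)]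
      have hseen' : ∀ y : Int, y ∈ PySem.Set.add seen (pvPref nums (m + 1)) ↔
          ∃ i ≤ m + 1, pvPref nums i = y := by
        intro y
        rw [PySem.Set.mem_add, hseen]
        constructor
        · rintro (⟨i, hi, hieq⟩ | rfl)
          · exact ⟨i, by omega, hieq⟩
          · exact ⟨m + 1, le_refl _, rfl⟩
        · rintro ⟨i, hi, hieq⟩
          rcases Nat.lt_or_ge i (m + 1) with h | h
          · exact Or.inl ⟨i, by omega, hieq⟩
          · have : i = m + 1 := by omega
            subst this; exact Or.inr hieq.symm
      rw [ih (m + 1) _ hdrop' (by omega) hseen']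
      constructor
      · rintro ⟨j, hj1, hj2, w⟩
        exact ⟨j, by omega, hj2, w⟩
      · rintro ⟨j, hj1, hj2, i, hi, hieq⟩
        rcases Nat.lt_or_ge (m + 1) j with h | h
        · exact ⟨j, h, hj2, i, hi, hieq⟩
        · exfalso
          have : j = m + 1 := by omega
          subst this
          exact hmem ((hseen _).mpr ⟨i, by omega, hieq⟩)

lemma hasZeroSumSublist_alt_iff (nums : List Int) :
    hasZeroSumSublist_alt nums = true ↔ pvEqPair nums := by
  have hP0 : pvPref nums 0 = 0 := by simp [pvPref]
  have hinit : ∀ x : Int, x ∈ PySem.Set.ofList ([0] : List Int) ↔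
      ∃ i ≤ 0, pvPref nums i = x := by
    intro x
    rw [PySem.Set.mem_ofList]
    constructor
    · intro hx
      simp only [List.mem_singleton] at hx
      exact ⟨0, le_refl _, by simp [pvPref, hx]⟩
    · rintro ⟨i, hi, hieq⟩
      interval_cases i
      simp [← hieq, pvPref]
  have hchar := pvLoopB_char nums nums 0 (PySem.Set.ofList [0]) (by simp) (by omega) hinit
  unfold hasZeroSumSublist_alt
  refine Iff.trans (by exact hchar) ?_
  unfold pvEqPair
  constructor
  · rintro ⟨j, -, hj2, w⟩; exact ⟨j, hj2, w⟩
  · rintro ⟨j, hj2, i, hi, w⟩; exact ⟨j, by omega, hj2, i, hi, w⟩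

lemma pvVis_imp_eq (nums : List Int) : pvVisPair nums → pvEqPair nums := by
  rintro ⟨j, hj, i, hi, hieq, -⟩
  exact ⟨j, hj, i, hi, hieq⟩

-- ===== VERDICT (by name: the statement is the Claim_ definition above) =====
theorem hasZeroSumSublist_spec : Claim_unchanged_hasZeroSumSublist := by
  intro nums _ hD
  unfold D_hasZeroSumSublist at hD
  by_cases hV : pvVisPair nums
  · have hA := (hasZeroSumSublist_iff nums).mpr hV
    have hB := (hasZeroSumSublist_alt_iff nums).mpr (pvVis_imp_eq nums hV)
    rw [hA, hB]
  · have hA : hasZeroSumSublist nums = false :=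
      Bool.eq_false_iff.mpr (fun h => hV ((hasZeroSumSublist_iff nums).mp h))
    have hE : ¬ pvEqPair nums := fun hE => hD ⟨hE, hV⟩
    have hB : hasZeroSumSublist_alt nums = false :=
      Bool.eq_false_iff.mpr (fun h => hE ((hasZeroSumSublist_alt_iff nums).mp h))
    rw [hA, hB]

theorem hasZeroSumSublist_changed : Claim_changed_hasZeroSumSublist := by
  unfold Claim_changed_hasZeroSumSublist; decide

theorem hasZeroSumSublist_tight : Claim_exact_hasZeroSumSublist := by
  intro nums _ hD
  obtain ⟨hEq, hVis⟩ := hD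
  have hA : hasZeroSumSublist nums = false :=
    Bool.eq_false_iff.mpr (fun h => hVis ((hasZeroSumSublist_iff nums).mp h))
  have hB : hasZeroSumSublist_alt nums = true :=
    (hasZeroSumSublist_alt_iff nums).mpr hEq
  rw [hA, hB]
  exact Bool.false_ne_true
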